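-- pv_equiv track=rewrite | github.com/kamilpajak/Heisenberg | src/heisenberg/reports/handlers/playwright.py | _find_blob_root
-- ===== SOURCE A (Python) =====
-- INDEX_HTML = "index.html"
--
-- def _find_blob_root(namelist: list[str]) -> str:
--     """Find the directory containing blob report .zip files.
--
--     Returns the prefix (e.g., "blob-report/") or empty string for root.
--     """
--     # Group .zip files by parent directory
--     dirs_with_zips: dict[str, int] = {}
--     for name in namelist:
--         if name.endswith(".zip"):
--             if "/" in name:
--                 parent = name.rsplit("/", 1)[0] + "/"
--             else:
--                 parent = ""
--             dirs_with_zips[parent] = dirs_with_zips.get(parent, 0) + 1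
--
--     # Return directory with most .zip files that's not an HTML report
--     for prefix in sorted(dirs_with_zips, key=lambda p: dirs_with_zips[p], reverse=True):
--         index_path = f"{prefix}{INDEX_HTML}" if prefix else INDEX_HTML
--         data_path = f"{prefix}data/"
--         if index_path not in namelist and not any(n.startswith(data_path) for n in namelist):
--             return prefix
--     return ""
-- ===== SOURCE B (Python) =====
-- INDEX_HTML = "index.html"
--
-- def _find_blob_root(namelist: list[str]) -> str:
--     """Find the directory containing blob report .zip files.
--
--     One pass to count zips per parent dir, then a single linear scan over the
--     counts (insertion order) keeping the best valid prefix, instead of sorting.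
--     """
--     counts: dict[str, int] = {}
--     for name in namelist:
--         if name.endswith(".zip"):
--             parent = name[: name.rfind("/") + 1]
--             counts[parent] = counts.get(parent, 0) + 1
--
--     best, best_count = "", 0
--     for prefix, count in counts.items():
--         if (
--             count > best_count
--             and prefix + INDEX_HTML not in namelist
--             and not any(n.startswith(prefix + "data/") for n in namelist)
--         ):
--             best, best_count = prefix, count
--     return best
-- ===== Notes on version B (the rewrite author's own statement) =====
-- stated objective: alternative
-- what changed: B keeps the one-pass zip-count dict but replaces A's 'sort prefixes by count descending, return the first that passes the report filter' with a single linear scan over the dict in insertion order that keeps the highest-count passing prefix (strict '>' reproduces the stable sort's tie-breaking), and computes the parent prefix branchlessly via rfind instead of a guarded rsplit.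
import Mathlib
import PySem

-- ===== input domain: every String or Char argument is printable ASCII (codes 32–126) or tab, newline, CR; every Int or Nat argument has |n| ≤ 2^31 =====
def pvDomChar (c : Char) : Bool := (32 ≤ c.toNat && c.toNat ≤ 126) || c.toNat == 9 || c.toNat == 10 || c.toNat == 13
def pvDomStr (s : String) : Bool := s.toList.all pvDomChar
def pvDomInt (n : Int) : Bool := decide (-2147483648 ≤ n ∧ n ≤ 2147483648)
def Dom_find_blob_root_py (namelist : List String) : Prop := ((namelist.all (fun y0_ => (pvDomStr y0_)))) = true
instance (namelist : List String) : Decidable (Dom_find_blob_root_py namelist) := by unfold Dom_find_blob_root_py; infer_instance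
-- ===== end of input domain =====

-- B replaces A's sort-by-count-then-first-valid scan with a one-pass maximum selection
-- over the counts dict (strict '>' in insertion order) and a branchless rfind-based
-- parent prefix; objective: alternative (same asymptotic cost, no sort).


-- ===== PORT A =====
-- name.rsplit("/", 1)[0] + "/" : everything up to and including the LAST '/'
-- (hand port of rsplit with the one-char separator "/" and maxsplit=1, then '+ "/"'; exact)
def pvParentA (cs : List Char) : List Char :=
  (cs.reverse.dropWhile (fun c => c != '/')).reverse

-- the 'for prefix in sorted(...)' loop with its early return; '' on fall-through
def pvLoopA (namelist : List String) : List (List Char) → List Char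
  | [] => []
  | p :: rest =>
    -- index_path = f"{prefix}index.html" if prefix else INDEX_HTML  (str truthiness = nonempty)
    let indexPath := if p.isEmpty then "index.html".toList else p ++ "index.html".toList
    let dataPath := p ++ "data/".toList
    if !((namelist.map String.toList).contains indexPath)
        && !(namelist.any (fun n => PySem.Chars.startswith n.toList dataPath)) then p
    else pvLoopA namelist rest

def find_blob_root_py (namelist : List String) : String :=
  let dirs := namelist.foldl (fun d name =>
    if PySem.Chars.endswith name.toList ".zip".toList then
      let parent := if PySem.Chars.isIn "/".toList name.toList then pvParentA name.toList else []
      d.insert parent (d.getD parent 0 + 1)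
    else d) (PySem.Dict.empty : PySem.Dict (List Char) Int)
  String.ofList (pvLoopA namelist (PySem.List.sorted dirs.keys (fun p => dirs.getD p 0) true))

-- ===== PORT B =====
-- s.rfind(c) for a single character: highest index of c in s, -1 if absent (hand port; exact)
def pvRfind (cs : List Char) (c : Char) : Int :=
  (cs.length : Int) - 1 - (cs.reverse.idxOf c : Int)

-- Source B's loop filter: no index.html at the prefix, no data/ child under it
def pvOk (namelist : List String) (p : List Char) : Bool :=
  !((namelist.map String.toList).contains (p ++ "index.html".toList))
    && !(namelist.any (fun n => PySem.Chars.startswith n.toList (p ++ "data/".toList)))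

def find_blob_root_py_alt (namelist : List String) : String :=
  let counts := namelist.foldl (fun d name =>
    if PySem.Chars.endswith name.toList ".zip".toList then
      -- parent = name[:name.rfind("/") + 1]; the slice bound is ≥ 0, so it is a take
      let parent := name.toList.take (pvRfind name.toList '/' + 1).toNat
      d.insert parent (d.getD parent 0 + 1)
    else d) (PySem.Dict.empty : PySem.Dict (List Char) Int)
  let best := counts.items.foldl (fun s pc =>
    if decide (s.2 < pc.2) && pvOk namelist pc.1 then (pc.1, pc.2) else s)
    (([] : List Char), (0 : Int))
  String.ofList best.1

-- ===== PRECONDITION & SPEC =====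
def Spec_find_blob_root_py (namelist : List String) (out : String) : Prop := out = find_blob_root_py_alt namelist
instance (namelist : List String) (out : String) : Decidable (Spec_find_blob_root_py namelist out) := by unfold Spec_find_blob_root_py; infer_instance

-- ===== CLAIM (what is proved, stated in full; the proofs are below) =====
def Claim_equal_find_blob_root_py : Prop := ∀ (namelist : List String), Dom_find_blob_root_py namelist → Spec_find_blob_root_py namelist (find_blob_root_py namelist)

-- ===== LEMMAS AND PROOFS =====

-- A's guarded rsplit-parent equals B's branchless rfind-parent
lemma parent_eq (cs : List Char) :
    (if PySem.Chars.isIn "/".toList cs then pvParentA cs else []) =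
      cs.take (pvRfind cs '/' + 1).toNat := by
  have hk : cs.reverse.idxOf '/' ≤ cs.length := by
    simpa using (List.idxOf_le_length (a := '/') (l := cs.reverse))
  have htn : (pvRfind cs '/' + 1).toNat = cs.length - cs.reverse.idxOf '/' := by
    unfold pvRfind; omega
  have hfun : (fun a : Char => !a != '/') = (fun a : Char => a == '/') := by
    funext a; simp [bne]
  have hdw : cs.reverse.dropWhile (fun c => c != '/') = cs.reverse.drop (cs.reverse.idxOf '/') := by
    rw [List.dropWhile_eq_drop_findIdx_not, hfun]; simp [List.idxOf]
  have hA : pvParentA cs = cs.take (cs.length - cs.reverse.idxOf '/') := by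
    unfold pvParentA
    rw [hdw, List.reverse_drop, List.reverse_reverse, List.length_reverse]
  by_cases hmem : '/' ∈ cs
  · rw [if_pos (by rw [show "/".toList = ['/'] from rfl, PySem.Chars.isIn_iff_infix,
        List.singleton_infix_iff]; exact hmem), hA, htn]
  · have hidx : cs.reverse.idxOf '/' = cs.length := by
      simpa using List.idxOf_eq_length (by simpa using hmem : '/' ∉ cs.reverse)
    rw [if_neg (by rw [show "/".toList = ['/'] from rfl, PySem.Chars.isIn_iff_infix,
        List.singleton_infix_iff]; exact hmem), htn, hidx]
    simp

-- 'first valid element of the list, else the empty prefix' as a function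
def pvFirst (ok : List Char → Bool) : List (List Char) → List Char
  | [] => []
  | p :: rest => if ok p then p else pvFirst ok rest

lemma loopA_eq_first (namelist : List String) (l : List (List Char)) :
    pvLoopA namelist l = pvFirst (pvOk namelist) l := by
  induction l with
  | nil => rfl
  | cons p rest ih =>
    show (if !((namelist.map String.toList).contains
            (if p.isEmpty then "index.html".toList else p ++ "index.html".toList))
          && !(namelist.any (fun n => PySem.Chars.startswith n.toList (p ++ "data/".toList)))
          then p else pvLoopA namelist rest) = _
    rcases p with _ | ⟨c, cs⟩
    · simp only [pvFirst, pvOk, List.nil_append, List.isEmpty_nil, if_true, ih]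
      rfl
    · simp only [pvFirst, pvOk, List.isEmpty_cons, ih]
      rfl

lemma first_insertBy_not_ok (ok : List Char → Bool) (b : List Char → List Char → Bool)
    (x : List Char) (l : List (List Char)) (hx : ok x = false) :
    pvFirst ok (PySem.List.insertBy b x l) = pvFirst ok l := by
  induction l with
  | nil => simp [PySem.List.insertBy, pvFirst, hx]
  | cons y ys ih =>
    simp only [PySem.List.insertBy]
    split
    · simp [pvFirst, hx]
    · simp only [pvFirst, ih]

lemma first_insertBy_beats (ok : List Char → Bool) (b : List Char → List Char → Bool)
    (x : List Char) (l : List (List Char)) (hx : ok x = true)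
    (h : ∀ y ∈ l, ok y = true → b x y = true) :
    pvFirst ok (PySem.List.insertBy b x l) = x := by
  induction l with
  | nil => simp [PySem.List.insertBy, pvFirst, hx]
  | cons y ys ih =>
    simp only [PySem.List.insertBy]
    split
    · simp [pvFirst, hx]
    · rename_i hb
      have hy : ok y = false := by
        by_contra hc
        exact hb (h y (by simp) (by simpa using hc))
      simp only [pvFirst, hy, Bool.false_eq_true, if_false]
      exact ih (fun z hz => h z (by simp [hz]))

lemma first_insertBy_keeps (κ : List Char → Int) (ok : List Char → Bool)
    (x m : List Char) (l : List (List Char))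
    (hp : l.Pairwise (fun a b => κ b ≤ κ a)) (hm : m ∈ l)
    (hf : pvFirst ok l = m) (hok : ok m = true) (hle : κ x ≤ κ m) :
    pvFirst ok (PySem.List.insertBy (fun a b => decide (κ b < κ a)) x l) = m := by
  induction l with
  | nil => cases hm
  | cons y ys ih =>
    rw [List.pairwise_cons] at hp
    simp only [PySem.List.insertBy]
    split
    · rename_i hb
      -- κ y < κ x ≤ κ m, but m ∈ y::ys forces κ m ≤ κ y: contradiction
      have hyx : κ y < κ x := by simpa using hb
      rcases List.mem_cons.1 hm with rfl | hm'
      · omega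
      · have := hp.1 m hm'; omega
    · rename_i hb
      by_cases hy : ok y = true
      · have hym : y = m := by simpa [pvFirst, hy] using hf
        subst hym
        simp [pvFirst, hy]
      · have hy' : ok y = false := by simpa using hy
        have hm' : m ∈ ys := by
          rcases List.mem_cons.1 hm with rfl | hm'
          · rw [hok] at hy'; cases hy'
          · exact hm'
        have hf' : pvFirst ok ys = m := by simpa [pvFirst, hy'] using hf
        simp only [pvFirst, hy', Bool.false_eq_true, if_false]
        exact ih hp.2 hm' hf'

lemma pairwise_insertBy (κ : List Char → Int) (x : List Char) (l : List (List Char))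
    (hp : l.Pairwise (fun a b => κ b ≤ κ a)) :
    (PySem.List.insertBy (fun a b => decide (κ b < κ a)) x l).Pairwise
      (fun a b => κ b ≤ κ a) := by
  induction l with
  | nil => simp [PySem.List.insertBy]
  | cons y ys ih =>
    rw [List.pairwise_cons] at hp
    simp only [PySem.List.insertBy]
    split
    · rename_i hb
      have hyx : κ y < κ x := by simpa using hb
      refine List.pairwise_cons.2 ⟨?_, List.pairwise_cons.2 hp⟩
      intro z hz
      rcases List.mem_cons.1 hz with rfl | hz'
      · omega
      · have := hp.1 z hz'; omega
    · rename_i hb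
      have hxy : κ x ≤ κ y := by simpa using hb
      refine List.pairwise_cons.2 ⟨?_, ih hp.2⟩
      intro z hz
      rcases (PySem.List.mem_insertBy _ _ _ _).1 hz with rfl | hz'
      · exact hxy
      · exact hp.1 z hz'

-- invariant tying the insertion-sorted accumulator to B's (best, best_count) state
def pvInv (κ : List Char → Int) (ok : List Char → Bool)
    (acc : List (List Char)) (s : List Char × Int) : Prop :=
  pvFirst ok acc = s.1 ∧
  acc.Pairwise (fun a b => κ b ≤ κ a) ∧
  ((s = ([], 0) ∧ ∀ a ∈ acc, ok a = false) ∨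
   (ok s.1 = true ∧ s.2 = κ s.1 ∧ s.1 ∈ acc ∧ ∀ a ∈ acc, ok a = true → κ a ≤ s.2))

lemma inv_step (κ : List Char → Int) (ok : List Char → Bool)
    (acc : List (List Char)) (s : List Char × Int) (x : List Char)
    (hx : 1 ≤ κ x) (h : pvInv κ ok acc s) :
    pvInv κ ok (PySem.List.insertBy (fun a b => decide (κ b < κ a)) x acc)
      (if decide (s.2 < κ x) && ok x then (x, κ x) else s) := by
  obtain ⟨hfst, hpw, hcase⟩ := h
  have hboundall : ∀ a ∈ acc, ok a = true → κ a ≤ s.2 := by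
    rcases hcase with ⟨_, hnone⟩ | ⟨_, _, _, hb⟩
    · intro a ha hoa; rw [hnone a ha] at hoa; cases hoa
    · exact hb
  by_cases hcond : (decide (s.2 < κ x) && ok x) = true
  · rw [Bool.and_eq_true, decide_eq_true_iff] at hcond
    obtain ⟨hs2, hokx⟩ := hcond
    have hcond' : (decide (s.2 < κ x) && ok x) = true := by
      simp [hs2, hokx]
    rw [if_pos hcond']
    refine ⟨?_, pairwise_insertBy κ x acc hpw, Or.inr ⟨hokx, rfl, ?_, ?_⟩⟩
    · exact first_insertBy_beats ok _ x acc hokx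
        (fun y hy hoy => by have := hboundall y hy hoy; simp; omega)
    · exact (PySem.List.mem_insertBy _ _ _ _).2 (Or.inl rfl)
    · intro a ha hoa
      rcases (PySem.List.mem_insertBy _ _ _ _).1 ha with rfl | ha'
      · exact le_refl _
      · have := hboundall a ha' hoa; simp; omega
  · rw [if_neg hcond]
    rw [Bool.and_eq_true, decide_eq_true_iff] at hcond
    by_cases hokx : ok x = true
    · -- x is valid but does not beat the current best: κ x ≤ s.2
      have hxle : κ x ≤ s.2 := by
        by_contra hc
        exact hcond ⟨by omega, hokx⟩
      rcases hcase with ⟨hs, hnone⟩ | ⟨hoks, hs2, hmem, hb⟩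
      · rw [hs] at hxle; simp at hxle; omega
      · refine ⟨?_, pairwise_insertBy κ x acc hpw, Or.inr ⟨hoks, hs2, ?_, ?_⟩⟩
        · exact first_insertBy_keeps κ ok x s.1 acc hpw hmem hfst hoks (by omega)
        · exact (PySem.List.mem_insertBy _ _ _ _).2 (Or.inr hmem)
        · intro a ha hoa
          rcases (PySem.List.mem_insertBy _ _ _ _).1 ha with rfl | ha'
          · exact hxle
          · exact hb a ha' hoa
    · have hokx' : ok x = false := by simpa using hokx
      refine ⟨?_, pairwise_insertBy κ x acc hpw, ?_⟩
      · rw [first_insertBy_not_ok ok _ x acc hokx']; exact hfst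
      · rcases hcase with ⟨hs, hnone⟩ | ⟨hoks, hs2, hmem, hb⟩
        · refine Or.inl ⟨hs, ?_⟩
          intro a ha
          rcases (PySem.List.mem_insertBy _ _ _ _).1 ha with rfl | ha'
          · exact hokx'
          · exact hnone a ha'
        · refine Or.inr ⟨hoks, hs2, (PySem.List.mem_insertBy _ _ _ _).2 (Or.inr hmem), ?_⟩
          intro a ha hoa
          rcases (PySem.List.mem_insertBy _ _ _ _).1 ha with rfl | ha'
          · rw [hokx'] at hoa; cases hoa
          · exact hb a ha' hoa

lemma inv_fold (κ : List Char → Int) (ok : List Char → Bool) (ks : List (List Char))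
    (h1 : ∀ k ∈ ks, 1 ≤ κ k) (acc : List (List Char)) (s : List Char × Int)
    (h : pvInv κ ok acc s) :
    pvInv κ ok
      (ks.foldl (fun acc x => PySem.List.insertBy (fun a b => decide (κ b < κ a)) x acc) acc)
      (ks.foldl (fun s k => if decide (s.2 < κ k) && ok k then (k, κ k) else s) s) := by
  induction ks generalizing acc s with
  | nil => exact h
  | cons k ks ih =>
    simp only [List.foldl_cons]
    exact ih (fun z hz => h1 z (by simp [hz])) _ _
      (inv_step κ ok acc s k (h1 k (by simp)) h)

-- A's 'first valid of the stable descending sort' IS B's one-pass strict-max selection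
lemma sel_eq (κ : List Char → Int) (ok : List Char → Bool) (ks : List (List Char))
    (h1 : ∀ k ∈ ks, 1 ≤ κ k) :
    pvFirst ok (PySem.List.sorted ks κ true) =
      (ks.foldl (fun s k => if decide (s.2 < κ k) && ok k then (k, κ k) else s)
        (([] : List Char), (0 : Int))).1 := by
  rw [PySem.List.sorted_rev_eq_foldl_insertBy]
  have hbase : pvInv κ ok [] (([] : List Char), (0 : Int)) :=
    ⟨rfl, List.Pairwise.nil, Or.inl ⟨rfl, by intro a ha; cases ha⟩⟩
  exact (inv_fold κ ok ks h1 [] _ hbase).1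

-- ===== VERDICT (by name: the statement is the Claim_ definition above) =====
theorem find_blob_root_py_spec : Claim_equal_find_blob_root_py := by
  intro namelist _
  unfold Spec_find_blob_root_py
  simp only [find_blob_root_py, find_blob_root_py_alt]
  -- the two count dicts are equal
  have hdict :
      (namelist.foldl (fun d name =>
        if PySem.Chars.endswith name.toList ".zip".toList then
          let parent := if PySem.Chars.isIn "/".toList name.toList then pvParentA name.toList else []
          d.insert parent (d.getD parent 0 + 1)
        else d) (PySem.Dict.empty : PySem.Dict (List Char) Int)) =
      (namelist.foldl (fun d name =>
        if PySem.Chars.endswith name.toList ".zip".toList then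
          let parent := name.toList.take (pvRfind name.toList '/' + 1).toNat
          d.insert parent (d.getD parent 0 + 1)
        else d) (PySem.Dict.empty : PySem.Dict (List Char) Int)) := by
    congr 1
    funext d name
    by_cases hz : PySem.Chars.endswith name.toList ".zip".toList = true
    · simp only [hz, if_true]
      rw [parent_eq name.toList]
    · rw [if_neg hz, if_neg hz]
  rw [hdict]
  set d := (namelist.foldl (fun d name =>
        if PySem.Chars.endswith name.toList ".zip".toList then
          let parent := name.toList.take (pvRfind name.toList '/' + 1).toNat
          d.insert parent (d.getD parent 0 + 1)
        else d) (PySem.Dict.empty : PySem.Dict (List Char) Int)) with hd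
  -- rewrite the dict as a plain insert-fold over the parents of the .zip names
  have hform : d = ((namelist.filter (fun n => PySem.Chars.endswith n.toList ".zip".toList)).map
        (fun n => n.toList.take (pvRfind n.toList '/' + 1).toNat)).foldl
        (fun d x => d.insert x (d.getD x 0 + 1)) (PySem.Dict.empty : PySem.Dict (List Char) Int) := by
    rw [List.foldl_map, List.foldl_filter, hd]
  have hnodup : d.keys.Nodup := by
    rw [hform]
    exact PySem.Dict.nodup_keys_foldl_insert _ _ _ (by simp)
  have h1 : ∀ k ∈ d.keys, 1 ≤ d.getD k 0 := by
    intro k hk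
    have hmem : k ∈ ((namelist.filter (fun n => PySem.Chars.endswith n.toList ".zip".toList)).map
        (fun n => n.toList.take (pvRfind n.toList '/' + 1).toNat)) := by
      rw [hform] at hk
      rw [PySem.Dict.keys_foldl_insert] at hk
      simpa [PySem.Dict.keys_empty] using (PySem.Set.mem_update _ _ _).1 hk
    have hcount : 1 ≤ ((namelist.filter (fun n => PySem.Chars.endswith n.toList ".zip".toList)).map
        (fun n => n.toList.take (pvRfind n.toList '/' + 1).toNat)).count k := by
      exact List.count_pos_iff.2 hmem
    rw [hform, PySem.Dict.getD_foldl_insert_add_one, PySem.Dict.getD_empty]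
    omega
  -- B's items fold = a fold over the keys
  rw [PySem.Dict.items_eq_map_keys d hnodup 0, List.foldl_map]
  -- A's loop = first-valid, then the main selection lemma
  rw [loopA_eq_first]
  exact congrArg String.ofList (sel_eq (fun k => d.getD k 0) (pvOk namelist) d.keys h1)
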